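-- pv_equiv track=rewrite | github.com/HsnSaboor/hadith-api-toon | scripts/merge_scraped_to_editions.py | escape_val
-- ===== SOURCE A (Python) =====
-- def escape_val(value):
--     if value is None or value == "":
--         return ""
--     s = str(value)
--     needs_quoting = any(c in s for c in [",", '"', ":", "\n", "\r"])
--     if needs_quoting:
--         s = s.replace('"', '""').replace("\n", "\\n").replace("\r", "\\r")
--         return f'"{s}"'
--     return s
-- ===== SOURCE B (Python) =====
-- def escape_val(value):
--     # Single pass: escape each character and set a quote flag, instead of a
--     # membership scan followed by three chained replace passes.
--     if value is None or value == "":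
--         return ""
--     s = str(value)
--     parts = []
--     quote = False
--     for c in s:
--         if c == '"':
--             parts.append('""')
--             quote = True
--         elif c == '\n':
--             parts.append('\\n')
--             quote = True
--         elif c == '\r':
--             parts.append('\\r')
--             quote = True
--         else:
--             parts.append(c)
--             if c == ',' or c == ':':
--                 quote = True
--     if quote:
--         return '"' + ''.join(parts) + '"'
--     return s
-- ===== Notes on version B (the rewrite author's own statement) =====
-- stated objective: alternative
-- what changed: Replaces the five-substring membership scan plus three chained replace passes with one fused pass over the characters that builds the escaped text and a quote flag simultaneously.
import Mathlib
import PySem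

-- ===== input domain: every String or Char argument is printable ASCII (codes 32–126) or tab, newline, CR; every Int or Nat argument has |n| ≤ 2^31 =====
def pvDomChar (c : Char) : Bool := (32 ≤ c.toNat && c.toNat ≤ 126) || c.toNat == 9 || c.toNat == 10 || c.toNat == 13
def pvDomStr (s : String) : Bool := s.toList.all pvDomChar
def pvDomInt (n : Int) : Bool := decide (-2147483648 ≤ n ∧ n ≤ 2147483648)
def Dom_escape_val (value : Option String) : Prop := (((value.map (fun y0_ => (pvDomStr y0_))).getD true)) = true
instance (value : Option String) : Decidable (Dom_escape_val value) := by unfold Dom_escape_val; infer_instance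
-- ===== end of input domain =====

-- B fuses A's membership scan and three chained replace passes into one pass over
-- the characters that builds the escaped text and a quote flag simultaneously (alternative decomposition, same cost).


-- ===== PORT A =====
def escape_val (value : Option String) : String :=
  match value with
  | none => ""
  | some v =>
    if v == "" then ""
    else
      let s := v
      let needs_quoting :=
        ([",", "\"", ":", "\n", "\r"] : List String).any (fun c => PySem.Str.isIn c s)
      if needs_quoting then
        let s2 := PySem.Str.replace (PySem.Str.replace (PySem.Str.replace s "\"" "\"\"") "\n" "\\n") "\r" "\\r"
        "\"" ++ s2 ++ "\""
      else s

-- ===== PORT B =====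
def escape_val_alt (value : Option String) : String :=
  match value with
  | none => ""
  | some v =>
    if v == "" then ""
    else
      let st := v.toList.foldl
        (fun (st : List Char × Bool) c =>
          if c == '"' then (st.1 ++ ['"', '"'], true)
          else if c == '\n' then (st.1 ++ ['\\', 'n'], true)
          else if c == '\r' then (st.1 ++ ['\\', 'r'], true)
          else (st.1 ++ [c], st.2 || (c == ',' || c == ':')))
        (([] : List Char), false)
      if st.2 then String.ofList ('"' :: (st.1 ++ ['"'])) else v

-- ===== PRECONDITION & SPEC =====
def Spec_escape_val (value : Option String) (out : String) : Prop := out = escape_val_alt value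
instance (value : Option String) (out : String) : Decidable (Spec_escape_val value out) := by unfold Spec_escape_val; infer_instance

-- ===== CLAIM (what is proved, stated in full; the proofs are below) =====
def Claim_equal_escape_val : Prop := ∀ (value : Option String), Dom_escape_val value → Spec_escape_val value (escape_val value)

-- ===== LEMMAS AND PROOFS =====

-- the per-character escape, the quote trigger, and B's loop body as named functions for the proofs
def pvEsc (c : Char) : List Char :=
  if c == '"' then ['"', '"']
  else if c == '\n' then ['\\', 'n']
  else if c == '\r' then ['\\', 'r']
  else [c]

def pvSpec (c : Char) : Bool :=
  c == ',' || c == '"' || c == ':' || c == '\n' || c == '\r'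

def pvStep (st : List Char × Bool) (c : Char) : List Char × Bool :=
  if c == '"' then (st.1 ++ ['"', '"'], true)
  else if c == '\n' then (st.1 ++ ['\\', 'n'], true)
  else if c == '\r' then (st.1 ++ ['\\', 'r'], true)
  else (st.1 ++ [c], st.2 || (c == ',' || c == ':'))

-- B's fold computes the flatMap of pvEsc and the any of pvSpec
theorem pv_foldl_char (l : List Char) : ∀ (acc : List Char) (q : Bool),
    l.foldl pvStep (acc, q) = (acc ++ l.flatMap pvEsc, q || l.any pvSpec) := by
  induction l with
  | nil => intro acc q; simp
  | cons c t ih =>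
    intro acc q
    rw [List.foldl_cons]
    by_cases h1 : c = '"'
    · subst h1
      have h : pvStep (acc, q) '"' = (acc ++ ['"', '"'], true) := by simp [pvStep]
      rw [h, ih]; simp [pvEsc, pvSpec]
    · by_cases h2 : c = '\n'
      · subst h2
        have h : pvStep (acc, q) '\n' = (acc ++ ['\\', 'n'], true) := by simp [pvStep]
        rw [h, ih]; simp [pvEsc, pvSpec]
      · by_cases h3 : c = '\r'
        · subst h3
          have h : pvStep (acc, q) '\r' = (acc ++ ['\\', 'r'], true) := by simp [pvStep]
          rw [h, ih]; simp [pvEsc, pvSpec]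
        · have h : pvStep (acc, q) c = (acc ++ [c], q || (c == ',' || c == ':')) := by
            simp [pvStep, h1, h2, h3]
          rw [h, ih]
          have e1 : (c == '"') = false := by simp [h1]
          have e2 : (c == '\n') = false := by simp [h2]
          have e3 : (c == '\r') = false := by simp [h3]
          simp [pvEsc, pvSpec, e1, e2, e3, Bool.or_assoc]

-- single-character replace is a flatMap
theorem pv_go_single (a : Char) (new : List Char) : ∀ (fuel : Nat) (l acc : List Char),
    l.length ≤ fuel →
    PySem.Chars.replace.go [a] new fuel l acc
      = acc.reverse ++ l.flatMap (fun c => if c == a then new else [c]) := by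
  intro fuel
  induction fuel with
  | zero =>
    intro l acc h
    have : l = [] := List.eq_nil_of_length_eq_zero (Nat.le_zero.mp h)
    subst this; simp [PySem.Chars.replace.go]
  | succ n ih =>
    intro l acc h
    cases l with
    | nil => simp [PySem.Chars.replace.go]
    | cons c t =>
      by_cases hc : a = c
      · subst hc
        have hpre : List.isPrefixOf [a] (a :: t) = true := by
          simp [List.isPrefixOf]
        simp only [PySem.Chars.replace.go, hpre, if_true, List.length_cons]
        rw [ih _ _ (by simpa using Nat.le_of_succ_le_succ h)]
        simp
      · have hpre : List.isPrefixOf [a] (c :: t) = false := by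
          simp [List.isPrefixOf, hc]
        simp only [PySem.Chars.replace.go, hpre, Bool.false_eq_true, if_false]
        rw [ih _ _ (by simpa using Nat.le_of_succ_le_succ h)]
        simp [Ne.symm hc]

theorem pv_replace_single (l : List Char) (a : Char) (new : List Char) :
    PySem.Chars.replace l [a] new = l.flatMap (fun c => if c == a then new else [c]) := by
  simp [PySem.Chars.replace, pv_go_single a new l.length l [] (le_refl _)]

-- the three chained replaces equal the single-pass escape
theorem pv_chain (l : List Char) :
    PySem.Chars.replace (PySem.Chars.replace (PySem.Chars.replace l ['"'] ['"', '"'])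
      ['\n'] ['\\', 'n']) ['\r'] ['\\', 'r'] = l.flatMap pvEsc := by
  simp only [pv_replace_single, List.flatMap_assoc]
  apply List.flatMap_congr
  intro c _
  by_cases h1 : c = '"'
  · subst h1; simp [pvEsc]
  · by_cases h2 : c = '\n'
    · subst h2; simp [pvEsc]
    · by_cases h3 : c = '\r'
      · subst h3; simp [pvEsc]
      · simp [pvEsc, h1, h2, h3]

-- membership of a single character as substring
theorem pv_isIn_single (a : Char) (l : List Char) :
    PySem.Chars.isIn (String.toList (String.ofList [a])) l = l.any (· == a) := by
  have hs : String.toList (String.ofList [a]) = [a] := by simp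
  rw [hs]
  rcases h : l.any (· == a) with _ | _
  · rw [← Bool.not_eq_true, PySem.Chars.isIn_iff_infix]
    intro hinf
    have : a ∈ l := by
      rcases hinf with ⟨s, t, hst⟩
      subst hst; simp
    simp only [List.any_eq_false, beq_iff_eq] at h
    exact h a this rfl
  · rw [PySem.Chars.isIn_iff_infix]
    simp only [List.any_eq_true, beq_iff_eq] at h
    rcases h with ⟨x, hx, rfl⟩
    rcases List.append_of_mem hx with ⟨s, t, rfl⟩
    exact ⟨s, t, by simp⟩

-- A's needs_quoting flag equals B's fold flag
theorem pv_needs (v : String) :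
    ([",", "\"", ":", "\n", "\r"] : List String).any (fun c => PySem.Str.isIn c v)
      = v.toList.any pvSpec := by
  simp only [List.any_cons, List.any_nil, PySem.Str.isIn_eq, Bool.or_false]
  have h1 : String.toList "," = String.toList (String.ofList [',']) := by simp
  have h2 : String.toList "\"" = String.toList (String.ofList ['"']) := by simp
  have h3 : String.toList ":" = String.toList (String.ofList [':']) := by simp
  have h4 : String.toList "\n" = String.toList (String.ofList ['\n']) := by simp
  have h5 : String.toList "\r" = String.toList (String.ofList ['\r']) := by simp
  rw [h1, h2, h3, h4, h5, pv_isIn_single, pv_isIn_single, pv_isIn_single,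
    pv_isIn_single, pv_isIn_single]
  apply Bool.eq_iff_iff.mpr
  simp only [Bool.or_eq_true, List.any_eq_true, pvSpec, beq_iff_eq]
  constructor
  · rintro (⟨x, hx, he⟩ | ⟨x, hx, he⟩ | ⟨x, hx, he⟩ | ⟨x, hx, he⟩ | ⟨x, hx, he⟩) <;>
      exact ⟨x, hx, by tauto⟩
  · rintro ⟨x, hx, ((((h | h) | h) | h) | h)⟩
    · exact Or.inl ⟨x, hx, h⟩
    · exact Or.inr (Or.inl ⟨x, hx, h⟩)
    · exact Or.inr (Or.inr (Or.inl ⟨x, hx, h⟩))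
    · exact Or.inr (Or.inr (Or.inr (Or.inl ⟨x, hx, h⟩)))
    · exact Or.inr (Or.inr (Or.inr (Or.inr ⟨x, hx, h⟩)))

-- ===== VERDICT (by name: the statement is the Claim_ definition above) =====
theorem escape_val_spec : Claim_equal_escape_val := by
  intro value _
  unfold Spec_escape_val escape_val escape_val_alt
  cases value with
  | none => rfl
  | some v =>
    simp only
    by_cases hv : v == ""
    · simp [hv]
    · simp only [hv, Bool.false_eq_true, if_false]
      rw [show (fun (st : List Char × Bool) c =>
          if c == '"' then (st.1 ++ ['"', '"'], true)
          else if c == '\n' then (st.1 ++ ['\\', 'n'], true)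
          else if c == '\r' then (st.1 ++ ['\\', 'r'], true)
          else (st.1 ++ [c], st.2 || (c == ',' || c == ':'))) = pvStep from rfl]
      rw [pv_foldl_char v.toList [] false, pv_needs v]
      simp only [List.nil_append, Bool.false_or]
      rcases h : v.toList.any pvSpec with _ | _
      · simp
      · simp only [if_true]
        apply String.toList_inj.mp
        simp only [String.toList_append, PySem.Str.toList_replace, String.toList_ofList]
        have hq : String.toList "\"" = ['"'] := by simp
        have hqq : String.toList "\"\"" = ['"', '"'] := by simp
        have hn : String.toList "\n" = ['\n'] := by simp
        have hbn : String.toList "\\n" = ['\\', 'n'] := by simp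
        have hr : String.toList "\r" = ['\r'] := by simp
        have hbr : String.toList "\\r" = ['\\', 'r'] := by simp
        rw [hq, hqq, hn, hbn, hr, hbr, pv_chain]
        simp
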